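-- pv_equiv track=rewrite | github.com/famatyyk/CTOAi | runner/agents/validator_agent.py | _bracket_balance
-- ===== SOURCE A (Python) =====
-- def _bracket_balance(src: str) -> tuple[bool, str]:
--     depth = 0
--     for ch in src:
--         if ch in "({[":
--             depth += 1
--         elif ch in ")}]":
--             depth -= 1
--     if depth == 0:
--         return True, "brackets balanced"
--     return False, f"unbalanced brackets (depth={depth})"
-- ===== SOURCE B (Python) =====
-- def _bracket_balance(src: str) -> tuple[bool, str]:
--     opens = src.count("(") + src.count("{") + src.count("[")
--     closes = src.count(")") + src.count("}") + src.count("]")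
--     depth = opens - closes
--     if depth == 0:
--         return True, "brackets balanced"
--     return False, f"unbalanced brackets (depth={depth})"
-- ===== Notes on version B (the rewrite author's own statement) =====
-- stated objective: faster
-- what changed: Replaced the char-by-char accumulating loop with six whole-string substring counts: depth = (count of each opener) - (count of each closer), no explicit loop or accumulator.
import Mathlib
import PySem

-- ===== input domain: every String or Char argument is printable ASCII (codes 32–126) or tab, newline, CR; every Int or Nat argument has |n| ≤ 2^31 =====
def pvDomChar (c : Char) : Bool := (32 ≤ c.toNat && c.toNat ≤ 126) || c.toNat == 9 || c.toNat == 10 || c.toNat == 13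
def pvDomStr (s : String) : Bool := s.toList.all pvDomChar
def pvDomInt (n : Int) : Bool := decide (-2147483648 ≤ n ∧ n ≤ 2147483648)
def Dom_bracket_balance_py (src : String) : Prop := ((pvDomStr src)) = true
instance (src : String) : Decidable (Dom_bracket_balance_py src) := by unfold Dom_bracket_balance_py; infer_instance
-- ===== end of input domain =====

-- B computes the net depth by six whole-string substring counts instead of A's char-by-char accumulating loop; same O(n), measurably faster in CPython (C-level str.count vs an interpreted loop).

-- ===== PORT A =====
-- literal port of A's loop: `ch in "({["` is membership of the char in that 3-char string
def bracket_balance_py (src : String) : Bool × String :=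
  let depth : Int := src.toList.foldl (fun depth ch =>
    if ("({[".toList.contains ch) then depth + 1
    else if (")}]".toList.contains ch) then depth - 1
    else depth) 0
  if depth = 0 then (true, "brackets balanced")
  else (false, "unbalanced brackets (depth=" ++ PySem.Int.toStr depth ++ ")")

-- ===== PORT B =====
def bracket_balance_py_alt (src : String) : Bool × String :=
  let opens : Int := (PySem.Str.count src "(" : Int) + (PySem.Str.count src "{" : Int) + (PySem.Str.count src "[" : Int)
  let closes : Int := (PySem.Str.count src ")" : Int) + (PySem.Str.count src "}" : Int) + (PySem.Str.count src "]" : Int)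
  let depth : Int := opens - closes
  if depth = 0 then (true, "brackets balanced")
  else (false, "unbalanced brackets (depth=" ++ PySem.Int.toStr depth ++ ")")

-- ===== PRECONDITION & SPEC =====
def Spec_bracket_balance_py (src : String) (out : Bool × String) : Prop := out = bracket_balance_py_alt src
instance (src : String) (out : Bool × String) : Decidable (Spec_bracket_balance_py src out) := by unfold Spec_bracket_balance_py; infer_instance

-- ===== CLAIM (what is proved, stated in full; the proofs are below) =====
def Claim_equal_bracket_balance_py : Prop := ∀ (src : String), Dom_bracket_balance_py src → Spec_bracket_balance_py src (bracket_balance_py src)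

-- ===== LEMMAS AND PROOFS =====

-- single-character substring count equals List.count
theorem chars_count_go_single (c : Char) (cs : List Char) : ∀ (fuel acc : Nat),
    cs.length ≤ fuel → PySem.Chars.count.go [c] fuel cs acc = acc + cs.count c := by
  induction cs with
  | nil =>
    intro fuel acc _
    cases fuel <;> simp [PySem.Chars.count.go]
  | cons h t ih =>
    intro fuel acc hf
    cases fuel with
    | zero => simp at hf
    | succ n =>
      simp only [PySem.Chars.count.go, List.isPrefixOf]
      by_cases hc : c = h
      · subst hc
        simp only [BEq.rfl, Bool.and_true, if_pos]
        rw [List.length_cons] at hf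
        simp only [List.length_singleton, List.drop_one, List.tail_cons]
        rw [ih n (acc + 1) (by omega)]
        simp
        omega
      · have hbe : (c == h) = false := by simp [hc]
        simp only [hbe, Bool.false_and, if_neg Bool.false_ne_true]
        rw [List.length_cons] at hf
        rw [ih n acc (by omega)]
        simp [Ne.symm hc]

theorem chars_count_single (cs : List Char) (c : Char) :
    PySem.Chars.count cs [c] = cs.count c := by
  have h := chars_count_go_single c cs cs.length 0 le_rfl
  simp only [PySem.Chars.count, List.isEmpty_cons, if_neg Bool.false_ne_true]
  simpa using h

-- A's fold computes (counts of openers) - (counts of closers)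
theorem fold_depth (l : List Char) : ∀ (d : Int),
    l.foldl (fun depth ch =>
      if ("({[".toList.contains ch) then depth + 1
      else if (")}]".toList.contains ch) then depth - 1
      else depth) d
    = d + ((l.count '(' : Int) + l.count '{' + l.count '[')
        - ((l.count ')' : Int) + l.count '}' + l.count ']') := by
  induction l with
  | nil => intro d; simp
  | cons h t ih =>
    intro d
    simp only [List.foldl_cons, List.count_cons]
    by_cases e1 : h = '('
    · subst e1; rw [if_pos (by decide), ih]; simp; ring
    by_cases e2 : h = '{'
    · subst e2; rw [if_pos (by decide), ih]; simp; ring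
    by_cases e3 : h = '['
    · subst e3; rw [if_pos (by decide), ih]; simp; ring
    by_cases e4 : h = ')'
    · subst e4; rw [if_neg (by decide), if_pos (by decide), ih]; simp; ring
    by_cases e5 : h = '}'
    · subst e5; rw [if_neg (by decide), if_pos (by decide), ih]; simp; ring
    by_cases e6 : h = ']'
    · subst e6; rw [if_neg (by decide), if_pos (by decide), ih]; simp; ring
    · rw [if_neg (by simp [e1, e2, e3]), if_neg (by simp [e4, e5, e6]), ih]
      simp [e1, e2, e3, e4, e5, e6]

-- ===== VERDICT (by name: the statement is the Claim_ definition above) =====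
theorem bracket_balance_py_spec : Claim_equal_bracket_balance_py := by
  intro src _
  unfold Spec_bracket_balance_py bracket_balance_py bracket_balance_py_alt
  simp only [PySem.Str.count_eq, fold_depth]
  simp only [show ("(" : String).toList = ['('] from rfl, show ("{" : String).toList = ['{'] from rfl,
    show ("[" : String).toList = ['['] from rfl, show (")" : String).toList = [')'] from rfl,
    show ("}" : String).toList = ['}'] from rfl, show ("]" : String).toList = [']'] from rfl,
    chars_count_single]
  ring_nf
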